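-- pv_equiv track=rewrite | github.com/jls83/reconciliation | reconciliation/reconciliation.py | reconcile_positions
-- ===== SOURCE A (Python) =====
-- def reconcile_positions(pos_dict_1, pos_dict_2):
--     """ Reconciles two position dictionaries into a new dictionary.
--
--         I had run through a number of implementations of this function before
--         settling on this one. See the repository history for further details.
--
--         Parameters:
--             pos_dict_1 (dict): Position data post-transactions
--             pos_dict_2 (dict): Position data reported by "bank"
--
--         Returns:
--             res (dict): Differences in reported values for each symbol (incl. cash)
--                 from each passed-in position data.
--     """
--
--     res = {}
--
--     all_keys = list(pos_dict_1.keys()) + list(pos_dict_2.keys())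
--
--     for symbol in all_keys:
--         if symbol not in pos_dict_2:  # "left" keys
--             symbol_diff = pos_dict_1[symbol] * -1
--         elif symbol not in pos_dict_1:  # "right" keys
--             symbol_diff = pos_dict_2[symbol]
--         else:  # "middle" keys
--             symbol_diff = pos_dict_2[symbol] - pos_dict_1[symbol]
--
--         if symbol_diff != 0:
--             res[symbol] = symbol_diff
--
--     return res
-- ===== SOURCE B (Python) =====
-- def reconcile_positions(pos_dict_1, pos_dict_2):
--     """Counter-style staged accumulation: seed a mutable accumulator with the
--     negated first positions, fold the second positions in additively, then
--     keep the nonzero entries. No key-union and no membership branching."""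
--     acc = {symbol: -value for symbol, value in pos_dict_1.items()}
--     for symbol, value in pos_dict_2.items():
--         acc[symbol] = acc.get(symbol, 0) + value
--     return {symbol: value for symbol, value in acc.items() if value != 0}
-- ===== Notes on version B (the rewrite author's own statement) =====
-- stated objective: alternative
-- what changed: Replaces A's union-of-key-lists pass with a three-way membership branch (common keys visited twice) by Counter.subtract-style staged accumulation: seed an accumulator dict with the negated first positions, additively fold the second positions into it, then filter the nonzero entries.
import Mathlib
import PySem

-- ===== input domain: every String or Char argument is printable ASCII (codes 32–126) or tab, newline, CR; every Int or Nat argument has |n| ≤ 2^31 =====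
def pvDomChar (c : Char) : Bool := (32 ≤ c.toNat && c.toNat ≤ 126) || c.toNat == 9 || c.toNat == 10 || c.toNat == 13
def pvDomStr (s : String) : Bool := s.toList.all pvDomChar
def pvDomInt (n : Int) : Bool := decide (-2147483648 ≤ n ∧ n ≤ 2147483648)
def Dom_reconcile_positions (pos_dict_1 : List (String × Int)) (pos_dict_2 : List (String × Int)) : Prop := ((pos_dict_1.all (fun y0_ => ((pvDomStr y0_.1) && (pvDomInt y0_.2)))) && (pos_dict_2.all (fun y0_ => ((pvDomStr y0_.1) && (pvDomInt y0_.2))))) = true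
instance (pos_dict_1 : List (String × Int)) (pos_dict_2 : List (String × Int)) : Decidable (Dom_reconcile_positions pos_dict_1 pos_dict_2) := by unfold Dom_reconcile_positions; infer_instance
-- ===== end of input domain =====

-- B replaces A's key-union pass with its three-way membership branch by Counter-style
-- staged accumulation (seed with negated d1, fold d2 in additively, filter nonzero);
-- objective: alternative (same cost, different algorithm).

-- ===== PORT A =====
-- A iterates list(d1.keys()) + list(d2.keys()) (common keys visited twice) with a
-- three-way membership branch; res is a dict built by insertion.
-- pos_dict_i[symbol] is ported as Dict.getD _ 0: on each branch where it is
-- evaluated the key is guaranteed present, so the default is never used (exact).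
def reconcile_positions (pos_dict_1 : List (String × Int)) (pos_dict_2 : List (String × Int)) : List (String × Int) :=
  let d1 : PySem.Dict String Int := PySem.Dict.ofList pos_dict_1
  let d2 : PySem.Dict String Int := PySem.Dict.ofList pos_dict_2
  let all_keys := d1.keys ++ d2.keys
  (all_keys.foldl (fun res symbol =>
      let symbol_diff : Int :=
        if ¬ d2.contains symbol then (d1.getD symbol 0) * (-1)
        else if ¬ d1.contains symbol then d2.getD symbol 0
        else d2.getD symbol 0 - d1.getD symbol 0
      if symbol_diff ≠ 0 then res.insert symbol symbol_diff else res)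
    PySem.Dict.empty).items

-- ===== PORT B =====
-- acc = {s: -v for s, v in d1.items()}; for s, v in d2.items(): acc[s] = acc.get(s, 0) + v;
-- return {s: v for s, v in acc.items() if v != 0}
def reconcile_positions_alt (pos_dict_1 : List (String × Int)) (pos_dict_2 : List (String × Int)) : List (String × Int) :=
  let d1 : PySem.Dict String Int := PySem.Dict.ofList pos_dict_1
  let d2 : PySem.Dict String Int := PySem.Dict.ofList pos_dict_2
  let acc0 := d1.items.foldl (fun a p => a.insert p.1 (-p.2)) PySem.Dict.empty
  let acc := d2.items.foldl (fun a p => a.insert p.1 (a.getD p.1 0 + p.2)) acc0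
  (acc.items.foldl (fun r p => if p.2 ≠ 0 then r.insert p.1 p.2 else r) PySem.Dict.empty).items

-- ===== PRECONDITION & SPEC =====
def Spec_reconcile_positions (pos_dict_1 : List (String × Int)) (pos_dict_2 : List (String × Int)) (out : List (String × Int)) : Prop := out = reconcile_positions_alt pos_dict_1 pos_dict_2
instance (pos_dict_1 : List (String × Int)) (pos_dict_2 : List (String × Int)) (out : List (String × Int)) : Decidable (Spec_reconcile_positions pos_dict_1 pos_dict_2 out) := by unfold Spec_reconcile_positions; infer_instance

-- ===== CLAIM (what is proved, stated in full; the proofs are below) =====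
def Claim_equal_reconcile_positions : Prop := ∀ (pos_dict_1 : List (String × Int)) (pos_dict_2 : List (String × Int)), Dom_reconcile_positions pos_dict_1 pos_dict_2 → Spec_reconcile_positions pos_dict_1 pos_dict_2 (reconcile_positions pos_dict_1 pos_dict_2)

-- ===== LEMMAS AND PROOFS =====

-- the uniform difference value both programs assign to a key
def pvG (d1 d2 : PySem.Dict String Int) (k : String) : Int := d2.getD k 0 - d1.getD k 0

-- A's three-way branch always equals the uniform formula
lemma branch_eq_g (d1 d2 : PySem.Dict String Int) (k : String) :
    (if ¬ d2.contains k then (d1.getD k 0) * (-1)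
     else if ¬ d1.contains k then d2.getD k 0
     else d2.getD k 0 - d1.getD k 0) = pvG d1 d2 k := by
  unfold pvG
  by_cases h2 : d2.contains k
  · by_cases h1 : d1.contains k
    · simp [h1, h2]
    · have := PySem.Dict.getD_of_not_contains d1 (0 : Int) (k := k) (by simpa using h1)
      simp [h1, h2, this]
  · have := PySem.Dict.getD_of_not_contains d2 (0 : Int) (k := k) (by simpa using h2)
    simp [h2, this]

-- a fold of unconditional inserts (k, g k) into the empty dict lists the distinct keys in order
lemma items_foldl_insert_g (g : String → Int) :
    ∀ (L : List String),
      ((L.foldl (fun (d : PySem.Dict String Int) k => d.insert k (g k)) PySem.Dict.empty).items)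
        = (PySem.Set.ofList L).map (fun k => (k, g k)) := by
  intro L
  induction L using List.reverseRecOn with
  | nil => rfl
  | append_singleton xs x ih =>
    have hkeys : (xs.foldl (fun (d : PySem.Dict String Int) k => d.insert k (g k)) PySem.Dict.empty).keys
        = PySem.Set.ofList xs := by
      rw [PySem.Dict.keys_foldl_insert, PySem.Dict.keys_empty, PySem.Set.update_nil_left]
    rw [List.foldl_append, List.foldl_cons, List.foldl_nil,
        PySem.Set.ofList_append_singleton]
    by_cases hx : x ∈ PySem.Set.ofList xs
    · have hc : (xs.foldl (fun (d : PySem.Dict String Int) k => d.insert k (g k)) PySem.Dict.empty).contains x = true := by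
        simp [PySem.Dict.contains_eq_decide_mem_keys, hkeys, hx]
      rw [PySem.Dict.items_insert_of_contains _ _ hc, ih,
          PySem.Set.add_of_mem hx, List.map_map]
      apply List.map_congr_left
      intro k _
      by_cases hk : k = x <;> simp [hk, Function.comp]
    · have hc : (xs.foldl (fun (d : PySem.Dict String Int) k => d.insert k (g k)) PySem.Dict.empty).contains x = false := by
        simp [PySem.Dict.contains_eq_decide_mem_keys, hkeys, hx]
      rw [PySem.Dict.items_insert_of_not_contains _ _ hc, ih,
          PySem.Set.add_of_not_mem hx, List.map_append]
      rfl

-- set(xs) commutes with filtering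
lemma set_ofList_filter (P : String → Bool) :
    ∀ (xs : List String), PySem.Set.ofList (xs.filter P) = (PySem.Set.ofList xs).filter P := by
  intro xs
  induction xs using List.reverseRecOn with
  | nil => rfl
  | append_singleton ys x ih =>
    rw [List.filter_append, PySem.Set.ofList_append_singleton]
    by_cases hP : P x
    · simp only [List.filter_cons, hP, List.filter_nil, if_true,
        PySem.Set.ofList_append_singleton, ih]
      by_cases hx : x ∈ PySem.Set.ofList ys
      · rw [PySem.Set.add_of_mem hx, PySem.Set.add_of_mem (by simp [List.mem_filter, hx, hP])]
      · rw [PySem.Set.add_of_not_mem hx,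
            PySem.Set.add_of_not_mem (by simp [List.mem_filter, hx]),
            List.filter_append]
        simp [hP]
    · simp only [List.filter_cons, hP, Bool.false_eq_true, if_false, List.filter_nil,
        List.append_nil, ih]
      by_cases hx : x ∈ PySem.Set.ofList ys
      · rw [PySem.Set.add_of_mem hx]
      · rw [PySem.Set.add_of_not_mem hx, List.filter_append]
        simp [hP]

-- a keyed-insert fold never changes the value at a key it does not visit
lemma getD_fold_not_mem (f : PySem.Dict String Int → String × Int → Int) :
    ∀ (L : List (String × Int)) (d0 : PySem.Dict String Int) (x : String),
      x ∉ L.map Prod.fst →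
      (L.foldl (fun a p => a.insert p.1 (f a p)) d0).getD x 0 = d0.getD x 0 := by
  intro L
  induction L with
  | nil => intro d0 x _; rfl
  | cons p L ih =>
    intro d0 x hx
    simp only [List.map_cons, List.mem_cons, not_or] at hx
    rw [List.foldl_cons, ih _ _ hx.2, PySem.Dict.getD_insert, if_neg hx.1]

-- the negating seed fold: value at a visited key is the negated dict value
lemma getD_fold_neg_mem (x : String) (v : Int) :
    ∀ (L : List (String × Int)) (d0 : PySem.Dict String Int),
      (L.map Prod.fst).Nodup → (x, v) ∈ L →
      (L.foldl (fun a p => a.insert p.1 (-p.2)) d0).getD x 0 = -v := by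
  intro L
  induction L with
  | nil => intro d0 _ h; cases h
  | cons p L ih =>
    intro d0 hnd hm
    simp only [List.map_cons, List.nodup_cons] at hnd
    rw [List.foldl_cons]
    rcases List.mem_cons.mp hm with h | h
    · subst h
      rw [getD_fold_not_mem _ _ _ _ hnd.1, PySem.Dict.getD_insert_self]
    · exact ih _ hnd.2 h

-- the additive fold: value at a visited key gains the dict value
lemma getD_fold_add_mem (x : String) (v : Int) :
    ∀ (L : List (String × Int)) (d0 : PySem.Dict String Int),
      (L.map Prod.fst).Nodup → (x, v) ∈ L →
      (L.foldl (fun a p => a.insert p.1 (a.getD p.1 0 + p.2)) d0).getD x 0 = d0.getD x 0 + v := by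
  intro L
  induction L with
  | nil => intro d0 _ h; cases h
  | cons p L ih =>
    intro d0 hnd hm
    simp only [List.map_cons, List.nodup_cons] at hnd
    rw [List.foldl_cons]
    rcases List.mem_cons.mp hm with h | h
    · subst h
      rw [getD_fold_not_mem _ _ _ _ hnd.1, PySem.Dict.getD_insert_self]
    · have hne : x ≠ p.1 := fun he => hnd.1 (he ▸ List.mem_map.mpr ⟨(x, v), h, rfl⟩)
      rw [ih _ hnd.2 h, PySem.Dict.getD_insert, if_neg hne]

-- membership in keys produces the witnessing item
lemma mem_keys_item (d : PySem.Dict String Int) (x : String) (hx : x ∈ d.keys) :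
    ∃ v, (x, v) ∈ d.items := by
  simp only [PySem.Dict.keys, List.mem_map] at hx
  obtain ⟨p, hp, hfst⟩ := hx
  exact ⟨p.2, by rwa [← hfst]⟩

lemma getD_of_not_mem_keys (d : PySem.Dict String Int) (x : String) (hx : x ∉ d.keys) :
    d.getD x 0 = 0 := by
  refine PySem.Dict.getD_of_not_contains d 0 ?_
  simp [PySem.Dict.contains_eq_decide_mem_keys, hx]

-- the seeded accumulator agrees with -(d1.getD) everywhere
lemma getD_acc0 (d1 : PySem.Dict String Int) (h1 : d1.keys.Nodup) (x : String) :
    (d1.items.foldl (fun a p => a.insert p.1 (-p.2)) PySem.Dict.empty).getD x 0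
      = -(d1.getD x 0) := by
  by_cases hx : x ∈ d1.keys
  · obtain ⟨v, hv⟩ := mem_keys_item d1 x hx
    rw [getD_fold_neg_mem x v _ _ h1 hv, PySem.Dict.getD_of_mem_items d1 hv h1]
  · rw [getD_fold_not_mem _ _ _ _ hx, getD_of_not_mem_keys d1 x hx]
    rfl

-- the additive pass adds d2.getD everywhere
lemma getD_acc (d2 : PySem.Dict String Int) (h2 : d2.keys.Nodup)
    (d0 : PySem.Dict String Int) (x : String) :
    (d2.items.foldl (fun a p => a.insert p.1 (a.getD p.1 0 + p.2)) d0).getD x 0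
      = d0.getD x 0 + d2.getD x 0 := by
  by_cases hx : x ∈ d2.keys
  · obtain ⟨v, hv⟩ := mem_keys_item d2 x hx
    rw [getD_fold_add_mem x v _ _ h2 hv, PySem.Dict.getD_of_mem_items d2 hv h2]
  · rw [getD_fold_not_mem _ _ _ _ hx, getD_of_not_mem_keys d2 x hx, add_zero]

-- ===== VERDICT (by name: the statement is the Claim_ definition above) =====
theorem reconcile_positions_spec : Claim_equal_reconcile_positions := by
  intro p1 p2 _
  unfold Spec_reconcile_positions reconcile_positions reconcile_positions_alt
  simp only []
  set d1 : PySem.Dict String Int := PySem.Dict.ofList p1 with hd1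
  set d2 : PySem.Dict String Int := PySem.Dict.ofList p2 with hd2
  have h1 : d1.keys.Nodup := PySem.Dict.nodup_keys_ofList p1
  have h2 : d2.keys.Nodup := PySem.Dict.nodup_keys_ofList p2
  -- ---- A side: rewrite the branch to pvG and collapse the fold ----
  have hstep : (d1.keys ++ d2.keys).foldl (fun res symbol =>
      let symbol_diff : Int :=
        if ¬ d2.contains symbol then (d1.getD symbol 0) * (-1)
        else if ¬ d1.contains symbol then d2.getD symbol 0
        else d2.getD symbol 0 - d1.getD symbol 0
      if symbol_diff ≠ 0 then res.insert symbol symbol_diff else res) PySem.Dict.empty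
      = (d1.keys ++ d2.keys).foldl (fun res symbol =>
          if pvG d1 d2 symbol ≠ 0 then res.insert symbol (pvG d1 d2 symbol) else res)
        PySem.Dict.empty := by
    apply PySem.List.foldl_congr_mem
    intro res k _
    simp only [branch_eq_g d1 d2 k]
  rw [hstep, PySem.List.foldl_ite_eq_foldl_filter, items_foldl_insert_g, set_ofList_filter]
  -- ---- B side: the accumulator's items are the distinct keys with value pvG ----
  set acc0 := d1.items.foldl (fun a p => a.insert p.1 (-p.2)) PySem.Dict.empty with hacc0
  set acc := d2.items.foldl (fun a p => a.insert p.1 (a.getD p.1 0 + p.2)) acc0 with hacc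
  have hnd0 : acc0.keys.Nodup := by
    rw [hacc0]
    exact PySem.Dict.nodup_keys_foldl_insert_key _ Prod.fst _ _ PySem.Dict.nodup_keys_empty
  have hndacc : acc.keys.Nodup := by
    rw [hacc]
    exact PySem.Dict.nodup_keys_foldl_insert_key _ Prod.fst _ _ hnd0
  have hkeys0 : acc0.keys = d1.keys := by
    rw [hacc0, PySem.Dict.keys_foldl_insert_key, PySem.Dict.keys_empty,
        PySem.Set.update_nil_left]
    exact PySem.Set.ofList_eq_self_of_nodup _ h1
  have hkeysacc : acc.keys = PySem.Set.ofList (d1.keys ++ d2.keys) := by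
    rw [hacc, PySem.Dict.keys_foldl_insert_key, hkeys0, PySem.Set.ofList_append,
        PySem.Set.ofList_eq_self_of_nodup _ h1]
    rfl
  have hget : ∀ x, acc.getD x 0 = pvG d1 d2 x := by
    intro x
    rw [hacc, getD_acc d2 h2 acc0 x, hacc0, getD_acc0 d1 h1 x]
    unfold pvG; ring
  have hitems : acc.items = (PySem.Set.ofList (d1.keys ++ d2.keys)).map
      (fun k => (k, pvG d1 d2 k)) := by
    rw [PySem.Dict.items_eq_map_keys acc hndacc 0, hkeysacc]
    exact List.map_congr_left (fun k _ => by rw [hget k])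
  -- ---- B side: the filtering comprehension keeps exactly the nonzero pairs ----
  rw [PySem.List.foldl_ite_eq_foldl_filter, hitems]
  have hfm : ((PySem.Set.ofList (d1.keys ++ d2.keys)).map (fun k => (k, pvG d1 d2 k))).filter
      (fun p => decide (p.2 ≠ 0))
      = ((PySem.Set.ofList (d1.keys ++ d2.keys)).filter (fun k => decide (pvG d1 d2 k ≠ 0))).map
          (fun k => (k, pvG d1 d2 k)) := by
    rw [List.filter_map]
    rfl
  rw [hfm]
  have hfresh : ∀ (M : List String) (hM : M.Nodup),
      ((M.map (fun k => (k, pvG d1 d2 k))).foldl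
          (fun (r : PySem.Dict String Int) p => r.insert p.1 p.2) PySem.Dict.empty).items
        = M.map (fun k => (k, pvG d1 d2 k)) := by
    intro M hM
    rw [List.foldl_map, items_foldl_insert_g, PySem.Set.ofList_eq_self_of_nodup _ hM]
  rw [hfresh _ (List.Nodup.filter _ (PySem.Set.nodup_ofList _))]
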